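-- pv_equiv track=rewrite | github.com/tommya98/Study | Coding-test/코딩 테스트 합격자 되기(파이썬)/Chapter05/04.py | solution
-- ===== SOURCE A (Python) =====
-- def solution(answers):
--     answer = []
--
--     p1 = [1, 2, 3, 4, 5]
--     p2 = [2, 1, 2, 3, 2, 4, 2, 5]
--     p3 = [3, 3, 1, 1, 2, 2, 4, 4, 5, 5]
--     score = [0, 0, 0]
--
--     for i in range(len(answers)):
--         score[0] += p1[i % len(p1)] == answers[i]
--         score[1] += p2[i % len(p2)] == answers[i]
--         score[2] += p3[i % len(p3)] == answers[i]
--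
--     max_score = max(score)
--
--     for i in range(3):
--         if score[i] == max_score:
--             answer.append(i + 1)
--
--     return answer
-- ===== SOURCE B (Python) =====
-- def solution(answers):
--     # All three patterns repeat with periods 5, 8, 10, each dividing 40, so the
--     # pattern value at position i depends only on i % 40.  Build one histogram of
--     # (i % 40, answer) pairs; each score is then 40 histogram lookups.
--     patterns = [
--         [1, 2, 3, 4, 5],
--         [2, 1, 2, 3, 2, 4, 2, 5],
--         [3, 3, 1, 1, 2, 2, 4, 4, 5, 5],
--     ]
--     counts = {}
--     for i, a in enumerate(answers):
--         key = (i % 40, a)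
--         counts[key] = counts.get(key, 0) + 1
--     scores = [sum(counts.get((r, p[r % len(p)]), 0) for r in range(40))
--               for p in patterns]
--     best = max(scores)
--     return [k + 1 for k, s in enumerate(scores) if s == best]
-- ===== Notes on version B (the rewrite author's own statement) =====
-- stated objective: alternative
-- what changed: Instead of comparing each answer against all three patterns in one indexed loop, B exploits that the pattern periods 5, 8, 10 all divide 40: it builds a single histogram of (i % 40, answer) pairs in one pass, then computes each score purely from 40 histogram lookups without rescanning the answers.
import Mathlib
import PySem

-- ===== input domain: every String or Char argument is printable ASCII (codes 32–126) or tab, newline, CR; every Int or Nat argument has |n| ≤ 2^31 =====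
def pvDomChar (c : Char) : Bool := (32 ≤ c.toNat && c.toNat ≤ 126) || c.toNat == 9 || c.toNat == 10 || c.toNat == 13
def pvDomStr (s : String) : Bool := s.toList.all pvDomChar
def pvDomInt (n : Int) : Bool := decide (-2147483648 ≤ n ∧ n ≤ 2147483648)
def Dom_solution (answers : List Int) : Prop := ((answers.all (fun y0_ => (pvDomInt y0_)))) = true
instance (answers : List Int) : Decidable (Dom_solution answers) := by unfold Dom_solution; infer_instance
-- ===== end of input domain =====

-- B replaces A's three interleaved per-position pattern comparisons by one histogram of
-- (i % 40, answer) pairs (40 = lcm of the pattern periods 5, 8, 10); each score is then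
-- computed from 40 histogram lookups without rescanning the answers (alternative algorithm).

-- ===== PORT A =====
def solution (answers : List Int) : List Int :=
  let p1 : List Int := [1, 2, 3, 4, 5]
  let p2 : List Int := [2, 1, 2, 3, 2, 4, 2, 5]
  let p3 : List Int := [3, 3, 1, 1, 2, 2, 4, 4, 5, 5]
  -- for i in range(len(answers)): score[k] += pk[i % len(pk)] == answers[i]
  let score : Int × Int × Int :=
    (PySem.List.enumerate answers 0).foldl
      (fun (s : Int × Int × Int) ia =>
        (s.1 + (if PySem.List.pyGetD p1 (PySem.Int.mod ia.1 (p1.length : Int)) 0 = ia.2 then 1 else 0),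
         s.2.1 + (if PySem.List.pyGetD p2 (PySem.Int.mod ia.1 (p2.length : Int)) 0 = ia.2 then 1 else 0),
         s.2.2 + (if PySem.List.pyGetD p3 (PySem.Int.mod ia.1 (p3.length : Int)) 0 = ia.2 then 1 else 0)))
      (0, 0, 0)
  let scoreL : List Int := [score.1, score.2.1, score.2.2]
  let maxScore : Int := (PySem.List.max? scoreL (fun y => y)).getD 0
  (PySem.List.pyRange 0 3 1).foldl
    (fun ans i => if PySem.List.pyGetD scoreL i 0 = maxScore then ans ++ [i + 1] else ans)
    []

-- ===== PORT B =====
def pvPatterns : List (List Int) := [[1, 2, 3, 4, 5], [2, 1, 2, 3, 2, 4, 2, 5], [3, 3, 1, 1, 2, 2, 4, 4, 5, 5]]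

def solution_alt (answers : List Int) : List Int :=
  -- counts[(i % 40, a)] += 1  (one pass over answers)
  let counts : PySem.Dict (Int × Int) Int :=
    (PySem.List.enumerate answers 0).foldl
      (fun d ia =>
        d.insert (PySem.Int.mod ia.1 40, ia.2) (d.getD (PySem.Int.mod ia.1 40, ia.2) 0 + 1))
      PySem.Dict.empty
  -- scores from 40 histogram lookups per pattern
  let scores : List Int := pvPatterns.map (fun p =>
    ((PySem.List.pyRange 0 40 1).map
      (fun r => counts.getD (r, PySem.List.pyGetD p (PySem.Int.mod r (p.length : Int)) 0) 0)).sum)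
  let best : Int := (PySem.List.max? scores (fun y => y)).getD 0
  (PySem.List.enumerate scores 0).filterMap
    (fun ks => if ks.2 = best then some (ks.1 + 1) else none)

-- ===== PRECONDITION & SPEC =====
def Spec_solution (answers : List Int) (out : List Int) : Prop := out = solution_alt answers
instance (answers : List Int) (out : List Int) : Decidable (Spec_solution answers out) := by unfold Spec_solution; infer_instance

-- ===== CLAIM (what is proved, stated in full; the proofs are below) =====
def Claim_equal_solution : Prop := ∀ (answers : List Int), Dom_solution answers → Spec_solution answers (solution answers)

-- ===== LEMMAS AND PROOFS =====

-- cyclic match count against pattern p starting at position j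
def cyc (p : List Int) : ℕ → List Int → Int
  | _, [] => 0
  | j, a :: rest => (if p.getD (j % p.length) 0 = a then 1 else 0) + cyc p (j + 1) rest

lemma foldl_triple {α : Type} (f1 f2 f3 : Int → α → Int) (l : List α) :
    ∀ (a b c : Int),
      l.foldl (fun (s : Int × Int × Int) x => (f1 s.1 x, f2 s.2.1 x, f3 s.2.2 x)) (a, b, c)
        = (l.foldl f1 a, l.foldl f2 b, l.foldl f3 c) := by
  induction l with
  | nil => intro a b c; simp
  | cons x t ih => intro a b c; simp [List.foldl_cons, ih]

lemma foldA (p : List Int) :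
    ∀ (ans : List Int) (j : ℕ) (s : Int),
      (PySem.List.enumerate ans (j : Int)).foldl
        (fun s ia =>
          s + (if PySem.List.pyGetD p (PySem.Int.mod ia.1 (p.length : Int)) 0 = ia.2 then 1 else 0)) s
      = s + cyc p j ans := by
  intro ans
  induction ans with
  | nil => intro j s; simp [PySem.List.enumerate_nil, cyc]
  | cons a rest ih =>
    intro j s
    rw [PySem.List.enumerate_cons, List.foldl_cons,
        show ((j : Int) + 1) = (((j + 1 : ℕ)) : Int) by push_cast; ring, ih]
    simp [cyc]
    have hg : PySem.List.pyGetD p ((j : Int) % (p.length : Int)) 0 = p[j % p.length]?.getD 0 := by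
      have h : ((j : ℤ) % (p.length : ℤ)) = ((j % p.length : ℕ) : ℤ) := by omega
      rw [h, PySem.List.pyGetD_natCast]
      simp [List.getD]
    rw [hg]
    ring

-- the histogram lookup is a count of keys in the keyed list
lemma fold_insert_getD (l : List (Int × Int)) :
    ∀ (d : PySem.Dict (Int × Int) Int) (k : Int × Int),
      (l.foldl
        (fun (d : PySem.Dict (Int × Int) Int) ia =>
          d.insert (PySem.Int.mod ia.1 40, ia.2) (d.getD (PySem.Int.mod ia.1 40, ia.2) 0 + 1)) d).getD k 0
      = d.getD k 0 + ((l.map (fun ia => (PySem.Int.mod ia.1 40, ia.2))).count k : Int) := by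
  induction l with
  | nil => intro d k; simp
  | cons x t ih =>
    intro d k
    rw [List.foldl_cons, ih, List.map_cons, List.count_cons, PySem.Dict.getD_insert]
    push_cast
    simp only [beq_iff_eq]
    split_ifs with h1 h2 h2
    · rw [h1]; ring
    · exact absurd h1.symm h2
    · exact absurd h2.symm h1
    · ring

lemma counts_getD (ans : List Int) (k : Int × Int) :
    ((PySem.List.enumerate ans 0).foldl
      (fun (d : PySem.Dict (Int × Int) Int) ia =>
        d.insert (PySem.Int.mod ia.1 40, ia.2) (d.getD (PySem.Int.mod ia.1 40, ia.2) 0 + 1))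
      PySem.Dict.empty).getD k 0
    = (((PySem.List.enumerate ans 0).map (fun ia => (PySem.Int.mod ia.1 40, ia.2))).count k : Int) := by
  rw [fold_insert_getD]
  simp

lemma cnt_cons_ne (v : Int → Int) (x : Int × Int) (r : Int) (t : List (Int × Int)) (h : ¬ x.1 = r) :
    (((x :: t).count (r, v r) : ℕ) : Int) = (t.count (r, v r) : Int) := by
  have h1 : ¬ ((r, v r) = x) := by
    intro he; exact h (by rw [← he])
  have h2 : ¬ (x = (r, v r)) := fun he => h1 he.symm
  simp [h2]

lemma cnt_cons_eq (v : Int → Int) (x : Int × Int) (t : List (Int × Int)) :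
    (((x :: t).count (x.1, v x.1) : ℕ) : Int)
      = (t.count (x.1, v x.1) : Int) + (if x.2 = v x.1 then 1 else 0) := by
  rcases x with ⟨m, b⟩
  by_cases hb : b = v m
  · simp [hb]
  · simp [Prod.ext_iff, hb]

-- adding one keyed pair to the histogram list raises the 40-bucket sum by its match indicator
lemma sum_count_cons (v : Int → Int) (x : Int × Int) (t : List (Int × Int)) :
    ∀ rs : List Int, rs.Nodup → x.1 ∈ rs →
      (rs.map (fun r => (((x :: t).count (r, v r) : ℕ) : Int))).sum
        = (rs.map (fun r => ((t.count (r, v r) : ℕ) : Int))).sum + (if x.2 = v x.1 then 1 else 0) := by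
  intro rs
  induction rs with
  | nil => intro _ h; simp at h
  | cons r rs' ih =>
    intro hnd hm
    rcases List.nodup_cons.mp hnd with ⟨hrt, hndt⟩
    simp only [List.map_cons, List.sum_cons]
    by_cases hrx : x.1 = r
    · subst hrx
      rw [cnt_cons_eq v x t]
      have hzero : (rs'.map (fun r => (((x :: t).count (r, v r) : ℕ) : Int))).sum
          = (rs'.map (fun r => ((t.count (r, v r) : ℕ) : Int))).sum := by
        apply congrArg List.sum
        apply List.map_congr_left
        intro r' hr'
        exact cnt_cons_ne v x r' t (fun he => hrt (he ▸ hr'))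
      rw [hzero]; ring
    · have hmt : x.1 ∈ rs' := by
        rcases List.mem_cons.mp hm with h | h
        · exact absurd h hrx
        · exact h
      rw [cnt_cons_ne v x r t hrx, ih hndt hmt]; ring

-- Σ_{r<40} count of (r, p[r % len p]) among the keyed pairs = cyclic match count
set_option maxHeartbeats 800000 in
lemma sum_count (p : List Int) (hdvd : p.length ∣ 40) :
    ∀ (ans : List Int) (j : ℕ),
      ((PySem.List.pyRange 0 40 1).map
        (fun r => ((((PySem.List.enumerate ans (j : Int)).map
            (fun ia => (PySem.Int.mod ia.1 40, ia.2))).count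
          (r, PySem.List.pyGetD p (PySem.Int.mod r (p.length : Int)) 0) : ℕ) : Int))).sum
      = cyc p j ans := by
  intro ans
  induction ans with
  | nil =>
    intro j
    simp [PySem.List.enumerate_nil, cyc]
  | cons a rest ih =>
    intro j
    rw [PySem.List.enumerate_cons]
    simp only [List.map_cons]
    have hj40 : PySem.Int.mod (j : Int) 40 = ((j % 40 : ℕ) : Int) := by
      rw [show (40 : ℤ) = ((40 : ℕ) : ℤ) from rfl, PySem.Int.mod_natCast]
    have hnd : (PySem.List.pyRange 0 40 1).Nodup := by decide
    have hmem : ((PySem.Int.mod (j : Int) 40, a) : Int × Int).1 ∈ PySem.List.pyRange 0 40 1 := by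
      rw [PySem.List.mem_pyRange_one, hj40]
      constructor <;> omega
    rw [sum_count_cons (fun r => PySem.List.pyGetD p (PySem.Int.mod r (p.length : Int)) 0)
          (PySem.Int.mod (j : Int) 40, a)
          ((PySem.List.enumerate rest ((j : Int) + 1)).map (fun ia => (PySem.Int.mod ia.1 40, ia.2)))
          (PySem.List.pyRange 0 40 1) hnd hmem]
    have hj1 : ((j : Int) + 1) = (((j + 1 : ℕ)) : Int) := by push_cast; ring
    rw [hj1, ih (j + 1)]
    have hv : PySem.List.pyGetD p (PySem.Int.mod (PySem.Int.mod (j : Int) 40) (p.length : Int)) 0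
        = p.getD (j % p.length) 0 := by
      rw [hj40, PySem.Int.mod_natCast, Nat.mod_mod_of_dvd j hdvd, PySem.List.pyGetD_natCast]
      try simp [List.getD]
    simp only [hv]
    simp [cyc, eq_comm]
    try ring

-- ===== VERDICT (by name: the statement is the Claim_ definition above) =====
set_option maxHeartbeats 800000 in
theorem solution_spec : Claim_equal_solution := by
  intro answers _
  simp only [Spec_solution, solution, solution_alt, pvPatterns, List.map_cons, List.map_nil]
  simp only [counts_getD]
  have h4 := sum_count [1,2,3,4,5] (by decide) answers 0
  have h5 := sum_count [2,1,2,3,2,4,2,5] (by decide) answers 0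
  have h6 := sum_count [3,3,1,1,2,2,4,4,5,5] (by decide) answers 0
  simp only [Nat.cast_zero] at h4 h5 h6
  rw [h4, h5, h6]
  have h1 := foldA [1,2,3,4,5] answers 0 0
  have h2 := foldA [2,1,2,3,2,4,2,5] answers 0 0
  have h3 := foldA [3,3,1,1,2,2,4,4,5,5] answers 0 0
  simp only [Nat.cast_zero, zero_add] at h1 h2 h3
  rw [foldl_triple
        (fun s ia => s + (if PySem.List.pyGetD [1,2,3,4,5] (PySem.Int.mod ia.1 (([1,2,3,4,5] : List Int).length : Int)) 0 = ia.2 then 1 else 0))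
        (fun s ia => s + (if PySem.List.pyGetD [2,1,2,3,2,4,2,5] (PySem.Int.mod ia.1 (([2,1,2,3,2,4,2,5] : List Int).length : Int)) 0 = ia.2 then 1 else 0))
        (fun s ia => s + (if PySem.List.pyGetD [3,3,1,1,2,2,4,4,5,5] (PySem.Int.mod ia.1 (([3,3,1,1,2,2,4,4,5,5] : List Int).length : Int)) 0 = ia.2 then 1 else 0))
        (PySem.List.enumerate answers 0) 0 0 0,
      h1, h2, h3]
  rw [show PySem.List.pyRange 0 3 1 = [0, 1, 2] from by decide]
  simp only [List.foldl_cons, List.foldl_nil,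
             PySem.List.enumerate_cons, PySem.List.enumerate_nil,
             List.filterMap_cons, List.filterMap_nil]
  rw [show ∀ c1 c2 c3 : Int, PySem.List.pyGetD [c1, c2, c3] 0 0 = c1 from by
        intros; simp [PySem.List.pyGetD],
      show ∀ c1 c2 c3 : Int, PySem.List.pyGetD [c1, c2, c3] 1 0 = c2 from by
        intros; simp [PySem.List.pyGetD],
      show ∀ c1 c2 c3 : Int, PySem.List.pyGetD [c1, c2, c3] 2 0 = c3 from by
        intros; simp [PySem.List.pyGetD]]
  split_ifs <;> simp
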